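-- pv_equiv track=rewrite | github.com/pypi-data/pypi-mirror-264 | packages/belenios/belenios-0.0.4.tar.gz/belenios-0.0.4/belenios/utilities/ElGamal.py | recover_number
-- ===== SOURCE A (Python) =====
-- def recover_number(chunks, p):
--     """
--     Recover the original number from smaller chunks.
--
--     Args:
--         chunks (list): List of smaller integers.
--         chunk_size (int): The size of each chunk.
--
--     Returns:
--         int: The original number.
--     """
--     # Determine chunk size based on the size of p
--     chunk_size = (p - 1).bit_length() - 1  # Using (p - 1) to ensure the chunks are smaller than p
--     number = 0
--     for chunk in chunks:
--         if chunk is None: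
--             return None
--         number = (number << chunk_size) + chunk
--     return number
-- ===== SOURCE B (Python) =====
-- def recover_number(chunks, p):
--     """Recover the original number from chunks by divide-and-conquer pairwise merging."""
--     chunk_size = (p - 1).bit_length() - 1
--     vals = []
--     for c in chunks:
--         if c is None:
--             return None
--         vals.append(c)
--     if not vals:
--         return 0
--     w = chunk_size
--     while len(vals) > 1:
--         if len(vals) % 2 == 1:
--             vals = [(vals[0] << w) + vals[1]] + vals[2:]
--         vals = [(vals[i] << w) + vals[i + 1] for i in range(0, len(vals), 2)]
--         w *= 2
--     return vals[0]
-- ===== Notes on version B (the rewrite author's own statement) =====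
-- stated objective: alternative
-- what changed: Replaces A's left-to-right fold of shift-and-add steps by a divide-and-conquer pairwise merge of adjacent chunks with doubling width; trades the sequential fold for balanced merges of similar measured cost.
import Mathlib
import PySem

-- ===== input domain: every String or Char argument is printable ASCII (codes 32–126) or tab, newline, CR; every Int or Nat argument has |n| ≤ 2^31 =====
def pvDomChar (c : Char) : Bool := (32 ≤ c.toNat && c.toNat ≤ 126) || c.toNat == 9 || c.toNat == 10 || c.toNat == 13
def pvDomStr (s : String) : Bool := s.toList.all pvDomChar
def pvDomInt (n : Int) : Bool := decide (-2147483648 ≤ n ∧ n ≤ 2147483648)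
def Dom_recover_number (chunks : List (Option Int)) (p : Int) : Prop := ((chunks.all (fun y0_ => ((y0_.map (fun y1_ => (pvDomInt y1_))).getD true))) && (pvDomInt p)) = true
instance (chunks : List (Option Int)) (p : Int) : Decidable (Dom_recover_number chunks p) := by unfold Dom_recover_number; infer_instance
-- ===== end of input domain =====

-- B replaces A's left fold of shift-and-add steps by a divide-and-conquer pairwise merge
-- of adjacent chunks with doubling width (an alternative algorithm, similar measured cost);
-- return value only, no mutation.

-- ===== PORT A =====
-- shared helper: Python's int.bit_length on a nonnegative number
def bitLen (n : Nat) : Nat :=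
  if n = 0 then 0 else bitLen (n / 2) + 1
decreasing_by exact Nat.div_lt_self (Nat.pos_of_ne_zero (by assumption)) (by norm_num)

-- A's loop; the shift 'number << chunk_size' is exact for chunk_size ≥ 0 (Pre_ excludes the
-- negative-shift ValueError case p = 1 with a leading non-None chunk)
def goA (cs : Int) : List (Option Int) → Int → Option Int
  | [], number => some number
  | none :: _, _ => none
  | some c :: rest, number => goA cs rest (number * 2 ^ cs.toNat + c)

def recover_number (chunks : List (Option Int)) (p : Int) : Option Int :=
  goA ((bitLen (p - 1).natAbs : Int) - 1) chunks 0

-- ===== PORT B =====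
-- B's first loop: collect the ints, early None return
def collect : List (Option Int) → Option (List Int)
  | [] => some []
  | none :: _ => none
  | some c :: rest => (collect rest).map (c :: ·)

-- B's comprehension: merge adjacent pairs, each shifted by w
def pairMerge (w : Int) : List Int → List Int
  | a :: b :: rest => (a * 2 ^ w.toNat + b) :: pairMerge w rest
  | l => l

theorem pairMerge_length (w : Int) : ∀ l : List Int, (pairMerge w l).length = (l.length + 1) / 2
  | [] => by simp [pairMerge]
  | [_] => by simp [pairMerge]
  | _ :: _ :: rest => by simp [pairMerge, pairMerge_length w rest]; omega

-- B's while loop: odd-length fix-up, then pairwise merge with doubled width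
def mergeLoop (w : Int) (vals : List Int) : Int :=
  match vals with
  | [] => 0
  | [x] => x
  | a :: b :: rest =>
    let vals' := if (a :: b :: rest).length % 2 = 1 then (a * 2 ^ w.toNat + b) :: rest
                 else a :: b :: rest
    mergeLoop (2 * w) (pairMerge w vals')
termination_by vals.length
decreasing_by
  simp only [pairMerge_length]
  split <;> simp <;> omega

def recover_number_alt (chunks : List (Option Int)) (p : Int) : Option Int :=
  let cs : Int := (bitLen (p - 1).natAbs : Int) - 1
  match collect chunks with
  | none => none
  | some [] => some 0
  | some vals => some (mergeLoop cs vals)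

-- ===== PRECONDITION & SPEC =====
-- Pre_ excludes exactly the inputs where Python A raises ValueError (negative shift count):
-- p = 1 (so chunk_size = -1) with a leading non-None chunk.
def Pre_recover_number (chunks : List (Option Int)) (p : Int) : Prop :=
  ¬ (p = 1 ∧ (chunks.head?.getD none).isSome = true)
instance (chunks : List (Option Int)) (p : Int) : Decidable (Pre_recover_number chunks p) := by
  unfold Pre_recover_number; infer_instance

def pvWitness_recover_number : List (Option Int) × Int := ([some 3, some 5], 17)

def Spec_recover_number (chunks : List (Option Int)) (p : Int) (out : Option Int) : Prop := out = recover_number_alt chunks p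
instance (chunks : List (Option Int)) (p : Int) (out : Option Int) : Decidable (Spec_recover_number chunks p out) := by unfold Spec_recover_number; infer_instance

-- ===== CLAIM (what is proved, stated in full; the proofs are below) =====
def Claim_equal_recover_number : Prop := ∀ (chunks : List (Option Int)) (p : Int), Dom_recover_number chunks p → Pre_recover_number chunks p → Spec_recover_number chunks p (recover_number chunks p)

-- ===== LEMMAS AND PROOFS =====

theorem goA_collect (cs : Int) : ∀ (l : List (Option Int)) (acc : Int),
    goA cs l acc = (collect l).map (fun vs => vs.foldl (fun a c => a * 2 ^ cs.toNat + c) acc)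
  | [], acc => rfl
  | none :: _, acc => rfl
  | some c :: rest, acc => by
    cases h : collect rest with
    | none => simp [goA, collect, h, goA_collect cs rest]
    | some vs => simp [goA, collect, h, goA_collect cs rest, List.foldl]

theorem foldl_pairMerge (w : Int) : ∀ (n : Nat) (l : List Int), l.length ≤ n → l.length % 2 = 0 →
    ∀ acc : Int, (pairMerge w l).foldl (fun a c => a * (2 ^ w.toNat * 2 ^ w.toNat) + c) acc
      = l.foldl (fun a c => a * 2 ^ w.toNat + c) acc := by
  intro n
  induction n with
  | zero =>
    intro l hl _ acc
    have h : l = [] := List.length_eq_zero_iff.mp (by omega)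
    simp [h, pairMerge]
  | succ n ih =>
    intro l hl hev acc
    match l with
    | [] => rfl
    | [x] => simp at hev
    | a :: b :: rest =>
      have hr : rest.length ≤ n := by simp at hl; omega
      have hre : rest.length % 2 = 0 := by simp at hev ⊢; omega
      simp only [pairMerge, List.foldl]
      rw [ih rest hr hre]
      ring

theorem mergeLoop_foldl : ∀ (n : Nat) (w : Int), 0 ≤ w → ∀ (vals : List Int), vals.length ≤ n →
    mergeLoop w vals = vals.foldl (fun a c => a * 2 ^ w.toNat + c) 0 := by
  intro n
  induction n with
  | zero =>
    intro w hw vals hl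
    have : vals = [] := List.length_eq_zero_iff.mp (by omega)
    simp [this, mergeLoop]
  | succ n ih =>
    intro w hw vals hl
    match vals with
    | [] => simp [mergeLoop]
    | [x] => simp [mergeLoop, List.foldl]
    | a :: b :: rest =>
      rw [mergeLoop]
      have h2w : (2 * w).toNat = w.toNat + w.toNat := by omega
      have hlen : ∀ l' : List Int, l'.length % 2 = 0 → l'.length ≤ (a :: b :: rest).length →
          mergeLoop (2 * w) (pairMerge w l')
            = l'.foldl (fun a c => a * 2 ^ w.toNat + c) 0 := by
        intro l' hev hle
        rw [ih (2 * w) (by omega) (pairMerge w l')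
            (by rw [pairMerge_length]; simp only [List.length_cons] at hl hle ⊢; omega)]
        rw [h2w, pow_add]
        exact foldl_pairMerge w l'.length l' le_rfl hev 0
      by_cases hodd : (a :: b :: rest).length % 2 = 1
      · rw [if_pos hodd]
        rw [hlen ((a * 2 ^ w.toNat + b) :: rest) (by simp at hodd ⊢; omega) (by simp)]
        simp [List.foldl]
      · rw [if_neg hodd]
        rw [hlen (a :: b :: rest) (by omega) le_rfl]

theorem bitLen_pos (n : Nat) (h : n ≠ 0) : 1 ≤ bitLen n := by
  rw [bitLen]; simp [h]

-- ===== VERDICT (by name: the statement is the Claim_ definition above) =====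
theorem recover_number_spec : Claim_equal_recover_number := by
  intro chunks p _ hpre
  unfold Spec_recover_number recover_number recover_number_alt
  set cs : Int := (bitLen (p - 1).natAbs : Int) - 1 with hcs
  rw [goA_collect]
  cases h : collect chunks with
  | none => simp
  | some vs =>
    match hv : vs, chunks, h with
    | [], chunks, h => simp
    | v :: vrest, chunks, h =>
      simp only [Option.map_some]
      congr 1
      have hcs0 : 0 ≤ cs := by
        have hp1 : p ≠ 1 := by
          intro hp
          apply hpre
          refine ⟨hp, ?_⟩
          match chunks, h with
          | some c :: _, _ => simp
        have : (p - 1).natAbs ≠ 0 := by omega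
        have := bitLen_pos _ this
        omega
      rw [mergeLoop_foldl (v :: vrest).length cs hcs0 _ le_rfl]
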